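-- pv_equiv track=rewrite | github.com/stoyaneft/HackBulgariaProgramming-101 | week0/2.Harder_problems/nth_fib_lists.py | nth_fib_lists
-- ===== SOURCE A (Python) =====
-- def nth_fib_lists(listA, listB, n):
--     if n == 1:
--         return listA
--     elif n == 2:
--         return listB
--     else:
--         last = list(listB)
--         previous = list(listA)
--         for i in range(2, n):
--             next = list(previous)
--             next.extend(last)
--             previous = list(last)
--             last = list(next)
--     return last
-- ===== SOURCE B (Python) =====
-- def nth_fib_lists(listA, listB, n):
--     # L_1 = listA, L_2 = listB, L_k = L_{k-2} + L_{k-1}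
--     if n == 1:
--         return listA
--     if n <= 2:
--         return listB
--     return nth_fib_lists(listA, listB, n - 2) + nth_fib_lists(listA, listB, n - 1)
-- ===== Notes on version B (the rewrite author's own statement) =====
-- stated objective: alternative
-- what changed: Replaces A's iterative loop over range(2,n) maintaining a (previous,last) pair of copied lists with a direct recursion on the defining recurrence L_n = L_{n-2} + L_{n-1}, with the usual fib-style base case n <= 2.
import Mathlib
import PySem

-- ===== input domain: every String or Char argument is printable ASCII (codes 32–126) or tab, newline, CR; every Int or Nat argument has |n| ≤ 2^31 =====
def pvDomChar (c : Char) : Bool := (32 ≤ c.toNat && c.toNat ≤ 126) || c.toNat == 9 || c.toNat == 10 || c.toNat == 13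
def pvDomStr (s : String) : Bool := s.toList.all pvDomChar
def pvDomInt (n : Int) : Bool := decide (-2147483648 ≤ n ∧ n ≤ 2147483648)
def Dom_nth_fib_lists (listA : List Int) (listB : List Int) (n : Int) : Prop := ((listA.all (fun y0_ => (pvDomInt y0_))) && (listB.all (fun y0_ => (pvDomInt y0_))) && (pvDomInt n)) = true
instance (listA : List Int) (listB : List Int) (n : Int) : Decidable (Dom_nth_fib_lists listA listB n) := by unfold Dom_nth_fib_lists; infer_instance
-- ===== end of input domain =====

-- B replaces A's iterative loop over range(2,n) (keeping a (previous,last) pair)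
-- with a direct recursion on the defining recurrence L_n = L_{n-2} ++ L_{n-1}
-- (objective: alternative decomposition, same cost).

-- ===== PORT A =====
def nth_fib_lists (listA : List Int) (listB : List Int) (n : Int) : List Int :=
  if n = 1 then listA
  else if n = 2 then listB
  else
    -- last = list(listB); previous = list(listA); for i in range(2, n): ...
    (List.foldl
      (fun (st : List Int × List Int) _ =>
        -- next = list(previous); next.extend(last); previous = list(last); last = list(next)
        let next := st.1 ++ st.2
        (st.2, next))
      (listA, listB) (PySem.List.pyRange 2 n 1)).2

-- ===== PORT B =====
def nth_fib_lists_alt (listA : List Int) (listB : List Int) (n : Int) : List Int :=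
  if n = 1 then listA
  else if n ≤ 2 then listB
  else nth_fib_lists_alt listA listB (n - 2) ++ nth_fib_lists_alt listA listB (n - 1)
termination_by n.toNat
decreasing_by all_goals omega

-- ===== PRECONDITION & SPEC =====
def Spec_nth_fib_lists (listA : List Int) (listB : List Int) (n : Int) (out : List Int) : Prop := out = nth_fib_lists_alt listA listB n
instance (listA : List Int) (listB : List Int) (n : Int) (out : List Int) : Decidable (Spec_nth_fib_lists listA listB n out) := by unfold Spec_nth_fib_lists; infer_instance

-- ===== CLAIM (what is proved, stated in full; the proofs are below) =====
def Claim_equal_nth_fib_lists : Prop := ∀ (listA : List Int) (listB : List Int) (n : Int), Dom_nth_fib_lists listA listB n → Spec_nth_fib_lists listA listB n (nth_fib_lists listA listB n)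

-- ===== LEMMAS AND PROOFS =====

-- one iteration of A's loop body on the (previous, last) state
def fibStep (st : List Int × List Int) : List Int × List Int := (st.2, st.1 ++ st.2)

-- k iterations, peeled at the back
def fibIter : Nat → (List Int × List Int) → List Int × List Int
  | 0, st => st
  | k + 1, st => fibStep (fibIter k st)

lemma fibIter_step_comm (k : Nat) (st : List Int × List Int) :
    fibIter k (fibStep st) = fibStep (fibIter k st) := by
  induction k with
  | zero => rfl
  | succ k ih => simp [fibIter, ih]

lemma foldl_eq_fibIter (l : List Int) (st : List Int × List Int) :
    List.foldl (fun (st : List Int × List Int) _ =>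
      let next := st.1 ++ st.2
      (st.2, next)) st l = fibIter l.length st := by
  induction l generalizing st with
  | nil => rfl
  | cons a l ih =>
      simp only [List.foldl_cons, List.length_cons, ih, fibIter]
      rw [← fibIter_step_comm]
      rfl

lemma fibIter_alt (la lb : List Int) (k : Nat) :
    fibIter k (la, lb) =
      (nth_fib_lists_alt la lb ((k : Int) + 1), nth_fib_lists_alt la lb ((k : Int) + 2)) := by
  induction k with
  | zero =>
      simp [fibIter, nth_fib_lists_alt]
  | succ k ih =>
      have h3 : nth_fib_lists_alt la lb ((k : Int) + 3) =
          nth_fib_lists_alt la lb ((k : Int) + 1) ++ nth_fib_lists_alt la lb ((k : Int) + 2) := by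
        rw [nth_fib_lists_alt]
        have h1 : ¬ ((k : Int) + 3 = 1) := by omega
        have h2 : ¬ ((k : Int) + 3 ≤ 2) := by omega
        simp only [h1, h2, if_false]
        rw [show ((k : Int) + 3 - 2) = (k : Int) + 1 by ring,
            show ((k : Int) + 3 - 1) = (k : Int) + 2 by ring]
      simp only [fibIter, ih, fibStep]
      push_cast
      rw [show ((k : Int) + 1 + 1) = (k : Int) + 2 by ring,
          show ((k : Int) + 1 + 2) = (k : Int) + 3 by ring, h3]

-- ===== VERDICT (by name: the statement is the Claim_ definition above) =====
theorem nth_fib_lists_spec : Claim_equal_nth_fib_lists := by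
  intro la lb n _
  unfold Spec_nth_fib_lists nth_fib_lists
  by_cases h1 : n = 1
  · simp [h1, nth_fib_lists_alt]
  · by_cases h2 : n = 2
    · simp [h2, nth_fib_lists_alt]
    · simp only [h1, h2, if_false]
      rw [foldl_eq_fibIter, PySem.List.length_pyRange_one, fibIter_alt]
      by_cases h0 : n ≤ 0
      · have : (n - 2).toNat = 0 := by omega
        rw [this]
        have e2 : nth_fib_lists_alt la lb 2 = lb := by rw [nth_fib_lists_alt]; norm_num
        have en : nth_fib_lists_alt la lb n = lb := by
          rw [nth_fib_lists_alt]; simp [h1, show n ≤ 2 by omega]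
        norm_num [e2, en]
      · have hn : ((n - 2).toNat : Int) + 2 = n := by omega
        rw [hn]
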